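-- pv_equiv track=rewrite | github.com/raeez/chiral-bar-cobar | compute/lib/genus_tower_l_hierarchy.py | cumulative_l_factor_count
-- ===== SOURCE A (Python) =====
-- def cumulative_l_factor_count(g_max=6):
--     """Cumulative count of independent L-function factors through each genus.
--
--     For V_Z:
--       Through genus 0: 0
--       Through genus 1: 1 (from zeta(2s))
--       Through genus 2: 3 (original + 2 new)
--       Through genus g (g>=1): 2g - 1
--     """
--     counts = []
--     for g in range(g_max + 1):
--         if g == 0:
--             counts.append(0)
--         elif g == 1:
--             counts.append(1)
--         else:
--             counts.append(2 * g - 1)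
--     return counts
-- ===== SOURCE B (Python) =====
-- def cumulative_l_factor_count(g_max=6):
--     counts = []
--     total = 0
--     for g in range(g_max + 1):
--         total += 0 if g == 0 else (1 if g == 1 else 2)
--         counts.append(total)
--     return counts
-- ===== Notes on version B (the rewrite author's own statement) =====
-- stated objective: alternative
-- what changed: B computes the sequence as a running cumulative sum of per-genus increments (0, 1, 2) in an accumulator instead of evaluating the closed form 2g-1 independently at each genus.
import Mathlib
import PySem

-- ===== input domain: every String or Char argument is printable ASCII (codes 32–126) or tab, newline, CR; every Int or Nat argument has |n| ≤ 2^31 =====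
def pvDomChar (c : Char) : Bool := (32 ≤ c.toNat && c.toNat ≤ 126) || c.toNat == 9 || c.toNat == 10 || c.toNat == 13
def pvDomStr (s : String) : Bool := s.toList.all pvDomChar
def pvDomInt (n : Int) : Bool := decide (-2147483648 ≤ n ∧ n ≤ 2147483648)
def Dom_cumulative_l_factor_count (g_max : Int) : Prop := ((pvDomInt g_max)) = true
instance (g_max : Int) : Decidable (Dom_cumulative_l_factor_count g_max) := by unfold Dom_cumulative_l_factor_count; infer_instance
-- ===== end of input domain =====

-- B maintains a running total of per-genus increments (0/1/2) instead of A's per-element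
-- closed form 2g-1; same cost, alternative decomposition by prefix summation.

-- ===== PORT A =====
def cumulative_l_factor_count (g_max : Int) : List Int :=
  (PySem.List.pyRange 0 (g_max + 1) 1).foldl
    (fun counts g =>
      if g = 0 then counts ++ [0]
      else if g = 1 then counts ++ [1]
      else counts ++ [2 * g - 1]) []

-- ===== PORT B =====
def cumulative_l_factor_count_alt (g_max : Int) : List Int :=
  ((PySem.List.pyRange 0 (g_max + 1) 1).foldl
    (fun (st : Int × List Int) g =>
      let total := st.1 + (if g = 0 then 0 else if g = 1 then 1 else 2)
      (total, st.2 ++ [total])) (0, [])).2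

-- ===== PRECONDITION & SPEC =====
def Spec_cumulative_l_factor_count (g_max : Int) (out : List Int) : Prop := out = cumulative_l_factor_count_alt g_max
instance (g_max : Int) (out : List Int) : Decidable (Spec_cumulative_l_factor_count g_max out) := by unfold Spec_cumulative_l_factor_count; infer_instance

-- ===== CLAIM (what is proved, stated in full; the proofs are below) =====
def Claim_equal_cumulative_l_factor_count : Prop := ∀ (g_max : Int), Dom_cumulative_l_factor_count g_max → Spec_cumulative_l_factor_count g_max (cumulative_l_factor_count g_max)

-- ===== LEMMAS AND PROOFS =====

-- running-total value of B after consuming range(0, n): 0 for n ≤ 1, else 2(n-1)-1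
def pvTotal (n : Nat) : Int := if n ≤ 1 then 0 else 2 * ((n : Int) - 1) - 1

theorem pv_fold_eq (n : Nat) :
    (PySem.List.pyRange 0 (n : Int) 1).foldl
      (fun (st : Int × List Int) g =>
        let total := st.1 + (if g = 0 then 0 else if g = 1 then 1 else 2)
        (total, st.2 ++ [total])) (0, [])
    = (pvTotal n,
       (PySem.List.pyRange 0 (n : Int) 1).foldl
        (fun counts g =>
          if g = 0 then counts ++ [0]
          else if g = 1 then counts ++ [1]
          else counts ++ [2 * g - 1]) []) := by
  induction n with
  | zero => simp [pvTotal]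
  | succ k ih =>
      have h : (0 : Int) ≤ (k : Int) := by positivity
      have hsplit : PySem.List.pyRange 0 ((k : Int) + 1) 1
          = PySem.List.pyRange 0 (k : Int) 1 ++ [(k : Int)] :=
        PySem.List.pyRange_one_succ_right h
      push_cast
      rw [hsplit, List.foldl_append, List.foldl_append, ih]
      simp only [List.foldl]
      rcases k with _ | _ | m
      · simp [pvTotal]
      · simp [pvTotal]
      · have h0 : ((m : Int) + 1 + 1) ≠ 0 := by omega
        have h1 : ((m : Int) + 1 + 1) ≠ 1 := by omega
        push_cast
        simp only [h0, h1, if_false, pvTotal]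
        have hk1 : ¬ (m + 1 + 1 ≤ 1) := by omega
        have hk2 : ¬ (m + 1 + 1 + 1 ≤ 1) := by omega
        simp only [hk1, hk2, if_false]
        push_cast
        ring_nf

-- ===== VERDICT (by name: the statement is the Claim_ definition above) =====
theorem cumulative_l_factor_count_spec : Claim_equal_cumulative_l_factor_count := by
  intro g_max _
  unfold Spec_cumulative_l_factor_count cumulative_l_factor_count cumulative_l_factor_count_alt
  by_cases h : g_max + 1 ≤ 0
  · rw [PySem.List.pyRange_one_eq_nil h]
    simp
  · have hn : g_max + 1 = ((g_max + 1).toNat : Int) := by omega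
    rw [hn, pv_fold_eq]
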